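-- pv_equiv track=rewrite | github.com/hkgkhanh/15-puzzle-solver | fringe_bfs.py | encode1234_board
-- ===== SOURCE A (Python) =====
-- def encode1234_board(board):
--     encode_list = ["x", "x", "x", "x", "x"]
--     for i in range(len(board)):
--         for j in range(len(board[i])):
--             if board[i][j] == 1:
--                 encode_list[0] = "0123456789abcdef"[i * 4 + j]
--             elif board[i][j] == 2:
--                 encode_list[1] = "0123456789abcdef"[i * 4 + j]
--             elif board[i][j] == 3:
--                 encode_list[2] = "0123456789abcdef"[i * 4 + j]
--             elif board[i][j] == 4:
--                 encode_list[3] = "0123456789abcdef"[i * 4 + j]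
--             elif board[i][j] == 0:
--                 encode_list[4] = "0123456789abcdef"[i * 4 + j]
--
--     encode_str = "".join(encode_list)
--     return encode_str
-- ===== SOURCE B (Python) =====
-- def encode1234_board(board):
--     hexs = "0123456789abcdef"
--     cells = [(i * 4 + j, v) for i, row in enumerate(board) for j, v in enumerate(row)]
--     out = []
--     for tile in (1, 2, 3, 4, 0):
--         out.append(next((hexs[p] for p, v in reversed(cells) if v == tile), "x"))
--     return "".join(out)
-- ===== Notes on version B (the rewrite author's own statement) =====
-- stated objective: alternative
-- what changed: Instead of one forward scan writing into a fixed 5-slot list via an elif chain, B flattens the board into (position, value) cells once and then, for each tile in (1,2,3,4,0), searches the reversed cell list for that tile's last occurrence (emitting 'x' if absent), turning slot-writes into five backward searches.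
import Mathlib
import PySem

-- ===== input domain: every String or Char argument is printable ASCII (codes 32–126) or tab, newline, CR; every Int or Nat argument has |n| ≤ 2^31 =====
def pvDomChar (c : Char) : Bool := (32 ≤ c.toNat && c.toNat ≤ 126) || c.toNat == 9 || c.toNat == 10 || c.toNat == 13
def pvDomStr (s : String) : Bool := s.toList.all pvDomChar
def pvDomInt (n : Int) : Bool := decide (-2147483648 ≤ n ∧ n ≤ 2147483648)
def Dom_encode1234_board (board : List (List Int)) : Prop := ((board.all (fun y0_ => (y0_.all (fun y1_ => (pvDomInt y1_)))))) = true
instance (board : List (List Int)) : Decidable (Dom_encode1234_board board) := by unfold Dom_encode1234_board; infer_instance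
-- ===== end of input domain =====

-- B flattens the board into (position, value) cells and, per tile in (1,2,3,4,0), searches the
-- reversed cell list for the last occurrence, instead of A's forward scan writing into a 5-slot list.

-- "0123456789abcdef"[n]; inside Pre_ the index is always in range, the .getD 'x' default is never reached
def pvHexAt (n : Int) : Char := (PySem.Str.pyGet? "0123456789abcdef" n).getD 'x'

-- ===== PORT A =====
def encA_cell (i : Int) (st : List Char) (q : Int × Int) : List Char :=
  if q.2 == 1 then st.set 0 (pvHexAt (i * 4 + q.1))
  else if q.2 == 2 then st.set 1 (pvHexAt (i * 4 + q.1))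
  else if q.2 == 3 then st.set 2 (pvHexAt (i * 4 + q.1))
  else if q.2 == 4 then st.set 3 (pvHexAt (i * 4 + q.1))
  else if q.2 == 0 then st.set 4 (pvHexAt (i * 4 + q.1))
  else st

def encode1234_board (board : List (List Int)) : String :=
  let el := (PySem.List.enumerate board).foldl
    (fun el p => (PySem.List.enumerate p.2).foldl (encA_cell p.1) el)
    ['x', 'x', 'x', 'x', 'x']
  String.ofList el

-- ===== PORT B =====
def encB_cells (board : List (List Int)) : List (Int × Int) :=
  (PySem.List.enumerate board).flatMap
    (fun p => (PySem.List.enumerate p.2).map (fun q => (p.1 * 4 + q.1, q.2)))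

def encB_find (cells : List (Int × Int)) (tile : Int) : Char :=
  match cells.reverse.find? (fun c => c.2 == tile) with
  | some c => pvHexAt c.1
  | none => 'x'

def encode1234_board_alt (board : List (List Int)) : String :=
  String.ofList (([1, 2, 3, 4, 0] : List Int).map (encB_find (encB_cells board)))

-- ===== PRECONDITION & SPEC =====
-- Pre_ excludes exactly the boards on which Python A raises IndexError: a cell with value in {0,1,2,3,4}
-- sitting at flattened position i*4+j ≥ 16 (B's Python raises there too).
def Pre_encode1234_board (board : List (List Int)) : Prop :=
  ∀ p ∈ PySem.List.enumerate board, ∀ q ∈ PySem.List.enumerate p.2,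
    (q.2 = 0 ∨ q.2 = 1 ∨ q.2 = 2 ∨ q.2 = 3 ∨ q.2 = 4) → p.1 * 4 + q.1 < 16
instance (board : List (List Int)) : Decidable (Pre_encode1234_board board) := by
  unfold Pre_encode1234_board; infer_instance

def pvWitness_encode1234_board : List (List Int) := [[1, 2, 7], [3, 0, 4]]

def Spec_encode1234_board (board : List (List Int)) (out : String) : Prop := out = encode1234_board_alt board
instance (board : List (List Int)) (out : String) : Decidable (Spec_encode1234_board board out) := by
  unfold Spec_encode1234_board; infer_instance

-- ===== CLAIM (what is proved, stated in full; the proofs are below) =====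
def Claim_equal_encode1234_board : Prop := ∀ (board : List (List Int)), Dom_encode1234_board board → Pre_encode1234_board board → Spec_encode1234_board board (encode1234_board board)

-- ===== LEMMAS AND PROOFS =====

-- A's cell step, re-expressed on a flattened (position, value) cell
def pvStep (st : List Char) (c : Int × Int) : List Char :=
  if c.2 == 1 then st.set 0 (pvHexAt c.1)
  else if c.2 == 2 then st.set 1 (pvHexAt c.1)
  else if c.2 == 3 then st.set 2 (pvHexAt c.1)
  else if c.2 == 4 then st.set 3 (pvHexAt c.1)
  else if c.2 == 0 then st.set 4 (pvHexAt c.1)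
  else st

theorem pvInner_flat (i : Int) (l : List (Int × Int)) (st : List Char) :
    l.foldl (encA_cell i) st = (l.map (fun q => (i * 4 + q.1, q.2))).foldl pvStep st := by
  induction l generalizing st with
  | nil => rfl
  | cons q l ih => simp only [List.foldl_cons, List.map_cons]; rw [ih]; rfl

theorem pvA_flat (l : List (Int × List Int)) (st : List Char) :
    l.foldl (fun el p => (PySem.List.enumerate p.2).foldl (encA_cell p.1) el) st
      = (l.flatMap (fun p => (PySem.List.enumerate p.2).map (fun q => (p.1 * 4 + q.1, q.2)))).foldl pvStep st := by
  induction l generalizing st with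
  | nil => rfl
  | cons p l ih =>
    rw [List.foldl_cons, List.flatMap_cons, List.foldl_append, ← pvInner_flat]
    exact ih _

theorem pvFold_find (cells : List (Int × Int)) :
    cells.foldl pvStep ['x', 'x', 'x', 'x', 'x']
      = [encB_find cells 1, encB_find cells 2, encB_find cells 3, encB_find cells 4, encB_find cells 0] := by
  induction cells using List.reverseRecOn with
  | nil => rfl
  | append_singleton l c ih =>
    rw [List.foldl_append, ih]
    rcases c with ⟨p, v⟩
    simp only [encB_find, List.reverse_append, List.reverse_singleton, List.singleton_append,
      List.find?_cons]
    by_cases h1 : v = 1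
    · subst h1; simp [pvStep]
    by_cases h2 : v = 2
    · subst h2; simp [pvStep]
    by_cases h3 : v = 3
    · subst h3; simp [pvStep]
    by_cases h4 : v = 4
    · subst h4; simp [pvStep]
    by_cases h0 : v = 0
    · subst h0; simp [pvStep]
    · simp [pvStep, show (v == 1) = false by simp [h1], show (v == 2) = false by simp [h2],
        show (v == 3) = false by simp [h3], show (v == 4) = false by simp [h4],
        show (v == 0) = false by simp [h0]]

-- ===== VERDICT (by name: the statement is the Claim_ definition above) =====
theorem encode1234_board_spec : Claim_equal_encode1234_board := by
  intro board _ _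
  show encode1234_board board = encode1234_board_alt board
  simp only [encode1234_board, encode1234_board_alt, encB_cells]
  rw [pvA_flat, pvFold_find]
  rfl
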